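-- pv_equiv track=rewrite | github.com/Claudia-Elijas/pysammos | pysammos/macroscopic_fields/field_dependencies.py | get_fields_to_compute
-- ===== SOURCE A (Python) =====
-- field_dependencies = {
--                 "density_particle": ["volume_fraction","density_mixture"],
--                 "velocity": ["momentum_density", "density_mixture"],
--                 "velocity_gradient" : ["velocity"],
--                 "shear_rate_tensor": ["velocity_gradient"],
--                 "kinetic_tensor": ["velocity", "velocity_gradient"],
--                 "total_stress_tensor": ["kinetic_tensor", "contact_tensor"],
--                 "pressure": ["total_stress_tensor"],
--                 "inertial_number": ["shear_rate_tensor", "pressure", "density_particle", "d43", "d32"],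
--                 "frictional_coefficient": ["total_stress_tensor", "pressure"],
--                 "granular_temperature": ["kinetic_tensor", "density_mixture"],
--                             }
--
-- def get_fields_to_compute(fields_to_export):
--
--         fields_to_compute = set()
--         # recursive functions for dependencies
--         def add_field(field):
--             if field not in fields_to_compute:
--                 fields_to_compute.add(field)
--                 for dep in field_dependencies.get(field, []):
--                     add_field(dep)
--
--         # Add all user-selected outputs and their dependencies
--         for field, include in fields_to_export.items():
--             if include:
--                 add_field(field)
--
--         return fields_to_compute
-- ===== SOURCE B (Python) =====
-- # Precomputed transitive-closure table: one dict lookup + set update per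
-- # selected field, no recursion / graph traversal at runtime.
-- _closure = {
--     "density_particle": ["density_particle", "volume_fraction", "density_mixture"],
--     "velocity": ["velocity", "momentum_density", "density_mixture"],
--     "velocity_gradient": ["velocity_gradient", "velocity", "momentum_density", "density_mixture"],
--     "shear_rate_tensor": ["shear_rate_tensor", "velocity_gradient", "velocity", "momentum_density", "density_mixture"],
--     "kinetic_tensor": ["kinetic_tensor", "velocity", "momentum_density", "density_mixture", "velocity_gradient"],
--     "total_stress_tensor": ["total_stress_tensor", "kinetic_tensor", "velocity", "momentum_density", "density_mixture", "velocity_gradient", "contact_tensor"],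
--     "pressure": ["pressure", "total_stress_tensor", "kinetic_tensor", "velocity", "momentum_density", "density_mixture", "velocity_gradient", "contact_tensor"],
--     "inertial_number": ["inertial_number", "shear_rate_tensor", "velocity_gradient", "velocity", "momentum_density", "density_mixture", "pressure", "total_stress_tensor", "kinetic_tensor", "contact_tensor", "density_particle", "volume_fraction", "d43", "d32"],
--     "frictional_coefficient": ["frictional_coefficient", "total_stress_tensor", "kinetic_tensor", "velocity", "momentum_density", "density_mixture", "velocity_gradient", "contact_tensor", "pressure"],
--     "granular_temperature": ["granular_temperature", "kinetic_tensor", "velocity", "momentum_density", "density_mixture", "velocity_gradient"],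
-- }
--
-- def get_fields_to_compute(fields_to_export):
--     fields_to_compute = set()
--     for field, include in fields_to_export.items():
--         if include:
--             fields_to_compute.update(_closure.get(field, [field]))
--     return fields_to_compute
-- ===== Notes on version B (the rewrite author's own statement) =====
-- stated objective: alternative
-- what changed: Replaces the runtime recursive depth-first walk of the dependency graph by a precomputed transitive-closure table, so each selected field costs one dict lookup and one set update instead of a recursive traversal.
import Mathlib
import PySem

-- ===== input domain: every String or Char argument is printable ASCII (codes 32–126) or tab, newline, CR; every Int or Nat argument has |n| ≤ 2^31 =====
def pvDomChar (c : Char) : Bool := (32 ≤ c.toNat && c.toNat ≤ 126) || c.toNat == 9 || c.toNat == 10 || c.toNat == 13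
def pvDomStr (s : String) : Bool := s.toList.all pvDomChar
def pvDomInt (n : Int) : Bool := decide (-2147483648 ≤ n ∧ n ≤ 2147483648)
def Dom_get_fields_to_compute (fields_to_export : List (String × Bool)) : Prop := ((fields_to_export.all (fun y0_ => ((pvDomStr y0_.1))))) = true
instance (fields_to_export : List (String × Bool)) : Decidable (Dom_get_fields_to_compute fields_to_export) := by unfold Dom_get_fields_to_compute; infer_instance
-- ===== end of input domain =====

-- B replaces A's runtime recursive dependency walk by a precomputed transitive-closure
-- table consulted once per selected field (objective: alternative; the returned Python
-- value is a set, modelled as a PySem.Set, so order is immaterial on the Python side).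

-- ===== PORT A =====
def fieldDependencies : PySem.Dict String (List String) :=
  PySem.Dict.mk
  [("density_particle", ["volume_fraction", "density_mixture"]),
   ("velocity", ["momentum_density", "density_mixture"]),
   ("velocity_gradient", ["velocity"]),
   ("shear_rate_tensor", ["velocity_gradient"]),
   ("kinetic_tensor", ["velocity", "velocity_gradient"]),
   ("total_stress_tensor", ["kinetic_tensor", "contact_tensor"]),
   ("pressure", ["total_stress_tensor"]),
   ("inertial_number", ["shear_rate_tensor", "pressure", "density_particle", "d43", "d32"]),
   ("frictional_coefficient", ["total_stress_tensor", "pressure"]),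
   ("granular_temperature", ["kinetic_tensor", "density_mixture"])]

-- add_field: the fuel argument only makes the recursion total; 16 (the number of
-- distinct field names in the table) is never exhausted on any input.
def addField : Nat → PySem.Set String → String → PySem.Set String
  | 0, acc, _ => acc
  | fuel + 1, acc, field =>
    if PySem.Set.contains acc field then acc
    else (PySem.Dict.getD fieldDependencies field []).foldl (addField fuel)
           (PySem.Set.add acc field)

def get_fields_to_compute (fields_to_export : List (String × Bool)) : List String :=
  fields_to_export.foldl
    (fun acc p => if p.2 then addField 16 acc p.1 else acc)
    (PySem.Set.empty : PySem.Set String)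

-- ===== PORT B =====
-- _closure.get(field, [field]) from Source B
def closureOf (field : String) : List String :=
  if field = "density_particle" then ["density_particle", "volume_fraction", "density_mixture"]
  else if field = "velocity" then ["velocity", "momentum_density", "density_mixture"]
  else if field = "velocity_gradient" then ["velocity_gradient", "velocity", "momentum_density", "density_mixture"]
  else if field = "shear_rate_tensor" then ["shear_rate_tensor", "velocity_gradient", "velocity", "momentum_density", "density_mixture"]
  else if field = "kinetic_tensor" then ["kinetic_tensor", "velocity", "momentum_density", "density_mixture", "velocity_gradient"]
  else if field = "total_stress_tensor" then ["total_stress_tensor", "kinetic_tensor", "velocity", "momentum_density", "density_mixture", "velocity_gradient", "contact_tensor"]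
  else if field = "pressure" then ["pressure", "total_stress_tensor", "kinetic_tensor", "velocity", "momentum_density", "density_mixture", "velocity_gradient", "contact_tensor"]
  else if field = "inertial_number" then ["inertial_number", "shear_rate_tensor", "velocity_gradient", "velocity", "momentum_density", "density_mixture", "pressure", "total_stress_tensor", "kinetic_tensor", "contact_tensor", "density_particle", "volume_fraction", "d43", "d32"]
  else if field = "frictional_coefficient" then ["frictional_coefficient", "total_stress_tensor", "kinetic_tensor", "velocity", "momentum_density", "density_mixture", "velocity_gradient", "contact_tensor", "pressure"]
  else if field = "granular_temperature" then ["granular_temperature", "kinetic_tensor", "velocity", "momentum_density", "density_mixture", "velocity_gradient"]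
  else [field]

def get_fields_to_compute_alt (fields_to_export : List (String × Bool)) : List String :=
  fields_to_export.foldl
    (fun acc p => if p.2 then PySem.Set.update acc (closureOf p.1) else acc)
    (PySem.Set.empty : PySem.Set String)

-- ===== PRECONDITION & SPEC =====
def Spec_get_fields_to_compute (fields_to_export : List (String × Bool)) (out : List String) : Prop := out = get_fields_to_compute_alt fields_to_export
instance (fields_to_export : List (String × Bool)) (out : List String) : Decidable (Spec_get_fields_to_compute fields_to_export out) := by unfold Spec_get_fields_to_compute; infer_instance

-- ===== CLAIM (what is proved, stated in full; the proofs are below) =====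
def Claim_equal_get_fields_to_compute : Prop := ∀ (fields_to_export : List (String × Bool)), Dom_get_fields_to_compute fields_to_export → Spec_get_fields_to_compute fields_to_export (get_fields_to_compute fields_to_export)

-- ===== LEMMAS AND PROOFS =====

-- the keys of fieldDependencies
def depKeys : List String :=
  ["density_particle", "velocity", "velocity_gradient", "shear_rate_tensor",
   "kinetic_tensor", "total_stress_tensor", "pressure", "inertial_number",
   "frictional_coefficient", "granular_temperature"]

-- an accumulator that already contains the whole closure of each of its members
def ClosedAcc (acc : List String) : Prop :=
  ∀ f ∈ acc, ∀ x ∈ closureOf f, x ∈ acc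

lemma mem_update {s : PySem.Set String} {xs : List String} {y : String} :
    y ∈ PySem.Set.update s xs ↔ y ∈ s ∨ y ∈ xs := by
  induction xs generalizing s with
  | nil => simp [PySem.Set.update]
  | cons x xs ih =>
    simp [PySem.Set.update, List.foldl] at *
    rw [ih]
    simp [PySem.Set.mem_add]
    tauto

lemma update_eq_self {s : PySem.Set String} {xs : List String}
    (h : ∀ x ∈ xs, x ∈ s) : PySem.Set.update s xs = s := by
  induction xs generalizing s with
  | nil => rfl
  | cons x xs ih =>
    have hx : x ∈ s := h x (by simp)
    have hadd : PySem.Set.add s x = s := by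
      simp [PySem.Set.add, PySem.Set.contains, hx]
    calc PySem.Set.update s (x :: xs) = PySem.Set.update (PySem.Set.add s x) xs := rfl
      _ = PySem.Set.update s xs := by rw [hadd]
      _ = s := ih fun y hy => h y (List.mem_cons_of_mem _ hy)

lemma contains_iff {s : PySem.Set String} {x : String} :
    PySem.Set.contains s x = true ↔ x ∈ s := by
  simp [PySem.Set.contains]

lemma nonkey_deps {f : String} (h : f ∉ depKeys) :
    PySem.Dict.getD fieldDependencies f [] = [] ∧ closureOf f = [f] := by
  simp [depKeys] at h
  obtain ⟨h1, h2, h3, h4, h5, h6, h7, h8, h9, h10⟩ := h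
  constructor
  · simp [PySem.Dict.getD, PySem.Dict.get?, fieldDependencies, List.find?, beq_eq_false_iff_ne.mpr (Ne.symm h1), beq_eq_false_iff_ne.mpr (Ne.symm h2),
      beq_eq_false_iff_ne.mpr (Ne.symm h3), beq_eq_false_iff_ne.mpr (Ne.symm h4),
      beq_eq_false_iff_ne.mpr (Ne.symm h5), beq_eq_false_iff_ne.mpr (Ne.symm h6),
      beq_eq_false_iff_ne.mpr (Ne.symm h7), beq_eq_false_iff_ne.mpr (Ne.symm h8),
      beq_eq_false_iff_ne.mpr (Ne.symm h9), beq_eq_false_iff_ne.mpr (Ne.symm h10)]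
  · simp [closureOf, h1, h2, h3, h4, h5, h6, h7, h8, h9, h10]

lemma mem_closureOf_self (f : String) : f ∈ closureOf f := by
  by_cases h : f ∈ depKeys
  · fin_cases h <;> decide
  · rw [(nonkey_deps h).2]; simp

-- the closure of a direct dependency is inside the closure of the field
lemma deps_closure (f : String) :
    ∀ d ∈ PySem.Dict.getD fieldDependencies f [], ∀ x ∈ closureOf d, x ∈ closureOf f := by
  by_cases h : f ∈ depKeys
  · fin_cases h <;> decide
  · rw [(nonkey_deps h).1]; simp

-- the closure of a member of a closure is inside that closure
lemma closure_trans (f : String) :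
    ∀ g ∈ closureOf f, ∀ x ∈ closureOf g, x ∈ closureOf f := by
  by_cases h : f ∈ depKeys
  · fin_cases h <;> decide
  · rw [(nonkey_deps h).2]
    intro g hg x hx
    simp at hg; subst hg
    simpa [(nonkey_deps h).2] using hx

lemma addField_prefix : ∀ (fuel : Nat) (b : PySem.Set String) (f : String),
    b <+: addField fuel b f := by
  intro fuel
  induction fuel with
  | zero => intro b f; simp [addField]
  | succ n ih =>
    intro b f
    have fold : ∀ (ds : List String) (b' : PySem.Set String),
        b' <+: List.foldl (addField n) b' ds := by
      intro ds
      induction ds with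
      | nil => intro b'; simp
      | cons d ds ihd =>
        intro b'
        exact (ih b' d).trans (ihd (addField n b' d))
    simp only [addField]
    split
    · exact List.prefix_rfl
    · have h1 : b <+: PySem.Set.add b f := by
        simp only [PySem.Set.add]; split
        · exact List.prefix_rfl
        · exact List.prefix_append b [f]
      exact h1.trans (fold _ _)

lemma addField_subset : ∀ (fuel : Nat) (b : PySem.Set String) (f x : String),
    x ∈ addField fuel b f → x ∈ b ∨ x ∈ closureOf f := by
  intro fuel
  induction fuel with
  | zero => intro b f x h; exact Or.inl (by simpa [addField] using h)
  | succ n ih =>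
    intro b f x h
    simp only [addField] at h
    split at h
    · exact Or.inl h
    · have fold : ∀ (ds : List String) (b' : PySem.Set String),
          (∀ y ∈ b', y ∈ b ∨ y ∈ closureOf f) →
          (∀ d ∈ ds, ∀ z ∈ closureOf d, z ∈ closureOf f) →
          ∀ y ∈ List.foldl (addField n) b' ds, y ∈ b ∨ y ∈ closureOf f := by
        intro ds
        induction ds with
        | nil => intro b' hb' _ y hy; exact hb' y hy
        | cons d ds ihd =>
          intro b' hb' hds y hy
          refine ihd (addField n b' d) ?_ (fun d' hd' => hds d' (by simp [hd'])) y hy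
          intro z hz
          rcases ih b' d z hz with hz' | hz'
          · exact hb' z hz'
          · exact Or.inr (hds d (by simp) z hz')
      refine fold _ _ ?_ (fun d hd z hz => deps_closure f d hd z hz) x h
      intro y hy
      rcases (by simpa [PySem.Set.mem_add] using hy : y ∈ b ∨ y = f) with hy' | hy'
      · exact Or.inl hy'
      · exact Or.inr (hy' ▸ mem_closureOf_self f)

-- the commuting lemma: with a closed accumulator on the left, A's DFS commutes with it
lemma addField_comm {acc : List String} (hC : ClosedAcc acc) :
    ∀ (fuel : Nat) (b : PySem.Set String) (f : String),
      addField fuel (PySem.Set.update acc b) f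
        = PySem.Set.update acc (addField fuel b f) := by
  intro fuel
  induction fuel with
  | zero => intro b f; simp [addField]
  | succ n ih =>
    have fold : ∀ (ds : List String) (b' : PySem.Set String),
        List.foldl (addField n) (PySem.Set.update acc b') ds
          = PySem.Set.update acc (List.foldl (addField n) b' ds) := by
      intro ds
      induction ds with
      | nil => intro b'; simp
      | cons d ds ihd =>
        intro b'
        simp only [List.foldl]
        rw [ih b' d, ihd]
    intro b f
    by_cases hb : f ∈ b
    · have hm : f ∈ PySem.Set.update acc b := mem_update.2 (Or.inr hb)
      simp [addField, contains_iff, hb, hm]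
    · by_cases ha : f ∈ acc
      · have hm : f ∈ PySem.Set.update acc b := mem_update.2 (Or.inl ha)
        obtain ⟨e, he⟩ := (addField_prefix (n + 1) b f)
        have hsub : ∀ x ∈ e, x ∈ PySem.Set.update acc b := by
          intro x hx
          have : x ∈ addField (n + 1) b f := by rw [← he]; simp [hx]
          rcases addField_subset (n + 1) b f x this with h' | h'
          · exact mem_update.2 (Or.inr h')
          · exact mem_update.2 (Or.inl (hC f ha x h'))
        calc addField (n + 1) (PySem.Set.update acc b) f
            = PySem.Set.update acc b := by simp [addField, contains_iff, hm]
          _ = PySem.Set.update (PySem.Set.update acc b) e := (update_eq_self hsub).symm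
          _ = PySem.Set.update acc (b ++ e) := by simp [PySem.Set.update, List.foldl_append]
          _ = PySem.Set.update acc (addField (n + 1) b f) := by rw [he]
      · have hm : f ∉ PySem.Set.update acc b := by
          intro h; rcases mem_update.1 h with h' | h' <;> contradiction
        have hadd : PySem.Set.add (PySem.Set.update acc b) f
            = PySem.Set.update acc (PySem.Set.add b f) := by
          simp [PySem.Set.add, contains_iff, hb, PySem.Set.update, List.foldl_append]
        simp only [addField, contains_iff]
        rw [if_neg (by simpa [contains_iff] using hm),
            if_neg (by simpa [contains_iff] using hb), hadd, fold]

lemma addField_empty (f : String) : addField 16 [] f = closureOf f := by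
  by_cases h : f ∈ depKeys
  · fin_cases h <;> decide
  · obtain ⟨h1, h2⟩ := nonkey_deps h
    simp [addField, h1, h2, PySem.Set.contains, PySem.Set.add]

lemma addField_step {acc : List String} (hC : ClosedAcc acc) (f : String) :
    addField 16 acc f = PySem.Set.update acc (closureOf f) := by
  have : PySem.Set.update acc ([] : List String) = acc := rfl
  calc addField 16 acc f = addField 16 (PySem.Set.update acc []) f := by rw [this]
    _ = PySem.Set.update acc (addField 16 [] f) := addField_comm hC 16 [] f
    _ = PySem.Set.update acc (closureOf f) := by rw [addField_empty]

lemma closed_update {acc : List String} (hC : ClosedAcc acc) (f : String) :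
    ClosedAcc (PySem.Set.update acc (closureOf f)) := by
  intro g hg x hx
  rcases mem_update.1 hg with hg' | hg'
  · exact mem_update.2 (Or.inl (hC g hg' x hx))
  · exact mem_update.2 (Or.inr (closure_trans f g hg' x hx))

lemma main_fold : ∀ (l : List (String × Bool)) (acc : List String), ClosedAcc acc →
    l.foldl (fun acc p => if p.2 then addField 16 acc p.1 else acc) acc
      = l.foldl (fun acc p => if p.2 then PySem.Set.update acc (closureOf p.1) else acc) acc := by
  intro l
  induction l with
  | nil => intro acc _; rfl
  | cons p l ih =>
    intro acc hC
    simp only [List.foldl]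
    by_cases hp : p.2
    · rw [if_pos hp, if_pos hp, addField_step hC]
      exact ih _ (closed_update hC p.1)
    · rw [if_neg hp, if_neg hp]
      exact ih _ hC

-- ===== VERDICT (by name: the statement is the Claim_ definition above) =====
theorem get_fields_to_compute_spec : Claim_equal_get_fields_to_compute := by
  intro l _
  unfold Spec_get_fields_to_compute get_fields_to_compute get_fields_to_compute_alt
  exact main_fold l [] (by intro f hf; simp at hf)
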